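-- pv_equiv track=rewrite | github.com/srinivastls/AADIS | src/agents/qa_agents/supervisor_agent.py | _create_multi_agent_response
-- ===== SOURCE A (Python) =====
-- from typing import Dict, List, Any, Optional
--
-- def _create_multi_agent_response(query: str, results: Dict[str, Any], analysis: Dict[str, Any]) -> str:
--     """Create a synthesized response from multiple agent results"""
--     response = f"Based on your query '{query}', I found information from multiple sources:\n\n"
--
--     # Order agents by relevance
--     agent_order = ["text", "table", "image"]
--     ordered_results = []
--
--     for agent_type in agent_order:
--         if agent_type in results:
--             ordered_results.append((agent_type, results[agent_type]))
--
--     # Add any remaining agents not in the predefined order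
--     for agent_type, result in results.items():
--         if agent_type not in agent_order:
--             ordered_results.append((agent_type, result))
--
--     # Combine responses
--     for i, (agent_type, result) in enumerate(ordered_results, 1):
--         agent_name = agent_type.replace("_", " ").title()
--         response += f"## {agent_name} Information:\n"
--         response += f"{result['answer']}\n\n"
--
--     response += "This comprehensive answer draws from multiple information sources in the documents."
--
--     return response
-- ===== SOURCE B (Python) =====
-- def _create_multi_agent_response(query, results, analysis):
--     """Stable sort by a computed rank instead of two ordering passes; join of parts instead of += accumulation."""
--     agent_order = ["text", "table", "image"]
--     ordered = sorted(
--         results.items(),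
--         key=lambda kv: agent_order.index(kv[0]) if kv[0] in agent_order else len(agent_order),
--     )
--     parts = [f"Based on your query '{query}', I found information from multiple sources:\n\n"]
--     parts.extend(
--         f"## {k.replace('_', ' ').title()} Information:\n{v['answer']}\n\n" for k, v in ordered
--     )
--     parts.append("This comprehensive answer draws from multiple information sources in the documents.")
--     return "".join(parts)
-- ===== Notes on version B (the rewrite author's own statement) =====
-- stated objective: idiomatic
-- what changed: Replaces A's two ordering loops (priority scan with membership tests plus a filtering pass over the dict) by ONE stable sort of results.items() under a computed rank key, and replaces the enumerate/+= accumulation by building a parts list joined once; correctness rests on sort stability giving non-priority agents their insertion order.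
import Mathlib
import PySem

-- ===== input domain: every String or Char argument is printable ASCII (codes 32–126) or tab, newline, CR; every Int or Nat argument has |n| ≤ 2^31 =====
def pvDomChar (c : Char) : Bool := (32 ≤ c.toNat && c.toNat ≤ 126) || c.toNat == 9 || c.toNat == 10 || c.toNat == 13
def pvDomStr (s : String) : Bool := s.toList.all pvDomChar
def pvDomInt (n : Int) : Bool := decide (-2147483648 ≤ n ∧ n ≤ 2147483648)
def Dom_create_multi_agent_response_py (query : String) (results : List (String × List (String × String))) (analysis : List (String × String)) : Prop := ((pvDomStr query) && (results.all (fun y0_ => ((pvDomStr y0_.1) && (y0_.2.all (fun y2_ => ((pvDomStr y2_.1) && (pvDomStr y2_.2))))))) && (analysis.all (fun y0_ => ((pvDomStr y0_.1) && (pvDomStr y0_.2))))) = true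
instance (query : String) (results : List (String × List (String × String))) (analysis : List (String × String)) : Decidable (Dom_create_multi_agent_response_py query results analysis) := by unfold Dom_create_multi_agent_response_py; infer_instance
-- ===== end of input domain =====

-- B replaces A's two ordering loops and += accumulation by ONE stable sort under a rank key and a single join (objective: idiomatic).


-- Shared primitive: Python str.title(), exact on ASCII (a letter is uppercased after a non-letter, lowercased after a letter).
def pyTitleChars (prevAlpha : Bool) : List Char → List Char
  | [] => []
  | c :: cs =>
    if PySem.Chars.isalpha c then
      (if prevAlpha then PySem.Chars.lowerChar c else PySem.Chars.upperChar c) :: pyTitleChars true cs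
    else c :: pyTitleChars false cs

def pyTitle (s : String) : String := String.ofList (pyTitleChars false s.toList)

-- ===== PORT A =====
def create_multi_agent_response_py (query : String) (results : List (String × List (String × String))) (analysis : List (String × String)) : String :=
  let response := "Based on your query '" ++ query ++ "', I found information from multiple sources:\n\n"
  let d := PySem.Dict.ofList results
  let agent_order : List String := ["text", "table", "image"]
  let ordered := agent_order.foldl
    (fun acc t => if d.contains t then acc ++ [(t, d.getD t [])] else acc)
    ([] : List (String × List (String × String)))
  let ordered2 := d.items.foldl
    (fun acc kv => if !(agent_order.contains kv.1) then acc ++ [kv] else acc) ordered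
  let response2 := ordered2.foldl
    (fun r kv =>
      (r ++ ("## " ++ pyTitle (PySem.Str.replace kv.1 "_" " ") ++ " Information:\n")) ++
      ((PySem.Dict.ofList kv.2).getD "answer" "" ++ "\n\n"))   -- result['answer']: Pre_ guarantees the key is present
    response
  response2 ++ "This comprehensive answer draws from multiple information sources in the documents."

-- ===== PORT B =====
-- Source B's sort key: agent_order.index(kv[0]) if kv[0] in agent_order else len(agent_order)
def pvRank (kv : String × List (String × String)) : Nat :=
  match PySem.List.index? ["text", "table", "image"] kv.1 with
  | some i => i
  | none => 3

def create_multi_agent_response_py_alt (query : String) (results : List (String × List (String × String))) (analysis : List (String × String)) : String :=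
  let d := PySem.Dict.ofList results
  let ordered := PySem.List.sorted d.items pvRank
  let parts :=
    ["Based on your query '" ++ query ++ "', I found information from multiple sources:\n\n"]
    ++ ordered.map (fun kv =>
        "## " ++ pyTitle (PySem.Str.replace kv.1 "_" " ") ++ " Information:\n" ++
        ((PySem.Dict.ofList kv.2).getD "answer" "" ++ "\n\n"))
    ++ ["This comprehensive answer draws from multiple information sources in the documents."]
  PySem.Str.join "" parts

-- ===== PRECONDITION & SPEC =====
-- Pre_ excludes exactly the inputs where Python raises KeyError: a result dict without an "answer" key.
def Pre_create_multi_agent_response_py (query : String) (results : List (String × List (String × String))) (analysis : List (String × String)) : Prop :=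
  ∀ v ∈ (PySem.Dict.ofList results).values, (PySem.Dict.ofList v).contains "answer" = true
instance (query : String) (results : List (String × List (String × String))) (analysis : List (String × String)) : Decidable (Pre_create_multi_agent_response_py query results analysis) := by unfold Pre_create_multi_agent_response_py; infer_instance

def pvWitness_create_multi_agent_response_py : String × (List (String × List (String × String))) × (List (String × String)) :=
  ("q", [("text", [("answer", "T")]), ("foo_bar", [("answer", "F")])], [])

def Spec_create_multi_agent_response_py (query : String) (results : List (String × List (String × String))) (analysis : List (String × String)) (out : String) : Prop := out = create_multi_agent_response_py_alt query results analysis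
instance (query : String) (results : List (String × List (String × String))) (analysis : List (String × String)) (out : String) : Decidable (Spec_create_multi_agent_response_py query results analysis out) := by unfold Spec_create_multi_agent_response_py; infer_instance

-- ===== CLAIM (what is proved, stated in full; the proofs are below) =====
def Claim_equal_create_multi_agent_response_py : Prop := ∀ (query : String) (results : List (String × List (String × String))) (analysis : List (String × String)), Dom_create_multi_agent_response_py query results analysis → Pre_create_multi_agent_response_py query results analysis → Spec_create_multi_agent_response_py query results analysis (create_multi_agent_response_py query results analysis)

-- ===== LEMMAS AND PROOFS =====

-- insertBy walks past every element it is not 'before'.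
theorem pv_insertBy_skip {α : Type} (before : α → α → Bool) (x : α) (A B : List α)
    (hA : ∀ y ∈ A, before x y = false) :
    PySem.List.insertBy before x (A ++ B) = A ++ PySem.List.insertBy before x B := by
  induction A with
  | nil => simp
  | cons a t ih =>
    simp only [List.cons_append, PySem.List.insertBy]
    rw [if_neg (by simp [hA a (List.mem_cons_self)])]
    rw [ih (fun y hy => hA y (List.mem_cons_of_mem a hy))]

theorem pv_insertBy_front {α : Type} (before : α → α → Bool) (x : α) (B : List α)
    (hB : ∀ y ∈ B, before x y = true) :
    PySem.List.insertBy before x B = x :: B := by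
  cases B with
  | nil => rfl
  | cons b t =>
    simp only [PySem.List.insertBy]
    rw [if_pos (hB b (List.mem_cons_self))]

-- Stable sort by a rank taking values in {0,1,2,3} is the concatenation of the four rank filters.
theorem pv_sorted_buckets {α : Type} (key : α → Nat) (hk : ∀ x, key x ≤ 3) (xs : List α) :
    PySem.List.sorted xs key
      = xs.filter (fun x => key x == 0) ++ xs.filter (fun x => key x == 1)
        ++ xs.filter (fun x => key x == 2) ++ xs.filter (fun x => key x == 3) := by
  rw [PySem.List.sorted_eq_foldl_insertBy]
  suffices h : ∀ (t l : List α),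
      t.foldl (fun acc x => PySem.List.insertBy (fun a b => decide (key a < key b)) x acc)
        (l.filter (fun x => key x == 0) ++ l.filter (fun x => key x == 1)
          ++ l.filter (fun x => key x == 2) ++ l.filter (fun x => key x == 3))
      = (l ++ t).filter (fun x => key x == 0) ++ (l ++ t).filter (fun x => key x == 1)
        ++ (l ++ t).filter (fun x => key x == 2) ++ (l ++ t).filter (fun x => key x == 3) by
    have := h xs []
    simpa using this
  intro t
  induction t with
  | nil => intro l; simp
  | cons x r ih =>
    intro l
    rw [List.foldl_cons]
    have hins : PySem.List.insertBy (fun a b => decide (key a < key b)) x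
        (l.filter (fun x => key x == 0) ++ l.filter (fun x => key x == 1)
          ++ l.filter (fun x => key x == 2) ++ l.filter (fun x => key x == 3))
      = (l ++ [x]).filter (fun x => key x == 0) ++ (l ++ [x]).filter (fun x => key x == 1)
        ++ (l ++ [x]).filter (fun x => key x == 2) ++ (l ++ [x]).filter (fun x => key x == 3) := by
      have hx := hk x
      have hfe : ∀ (k : Nat) (y : α), y ∈ l.filter (fun z => key z == k) → key y = k := by
        intro k y hy
        have := List.of_mem_filter hy
        simpa using this
      interval_cases hkx : key x
      · -- key x = 0 : skip f0 (ties, stability), go before f1,f2,f3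
        rw [List.append_assoc, List.append_assoc,
          pv_insertBy_skip _ _ _ _ (by
            intro y hy; simp [hfe 0 y hy, hkx]),
          pv_insertBy_front _ _ _ (by
            intro y hy
            simp only [List.mem_append] at hy
            rcases hy with hy | hy | hy
            · simp [hfe 1 y hy, hkx]
            · simp [hfe 2 y hy, hkx]
            · simp [hfe 3 y hy, hkx])]
        simp [List.filter_append, hkx, List.append_assoc]
      · -- key x = 1
        rw [List.append_assoc, List.append_assoc,
          pv_insertBy_skip _ _ _ _ (by
            intro y hy; simp [hfe 0 y hy, hkx]),
          pv_insertBy_skip _ _ _ _ (by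
            intro y hy; simp [hfe 1 y hy, hkx]),
          pv_insertBy_front _ _ _ (by
            intro y hy
            simp only [List.mem_append] at hy
            rcases hy with hy | hy
            · simp [hfe 2 y hy, hkx]
            · simp [hfe 3 y hy, hkx])]
        simp [List.filter_append, hkx, List.append_assoc]
      · -- key x = 2
        rw [List.append_assoc, List.append_assoc,
          pv_insertBy_skip _ _ _ _ (by
            intro y hy; simp [hfe 0 y hy, hkx]),
          pv_insertBy_skip _ _ _ _ (by
            intro y hy; simp [hfe 1 y hy, hkx]),
          pv_insertBy_skip _ _ _ _ (by
            intro y hy; simp [hfe 2 y hy, hkx]),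
          pv_insertBy_front _ _ _ (by
            intro y hy; simp [hfe 3 y hy, hkx])]
        simp [List.filter_append, hkx, List.append_assoc]
      · -- key x = 3 : skip everything, land at the end
        rw [List.append_assoc, List.append_assoc,
          pv_insertBy_skip _ _ _ _ (by
            intro y hy; simp [hfe 0 y hy, hkx]),
          pv_insertBy_skip _ _ _ _ (by
            intro y hy; simp [hfe 1 y hy, hkx]),
          pv_insertBy_skip _ _ _ _ (by
            intro y hy; simp [hfe 2 y hy, hkx]),
          PySem.List.insertBy_of_forall_not_before _ _ _ (by
            intro y hy; simp [hfe 3 y hy, hkx])]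
        simp [List.filter_append, hkx, List.append_assoc]
    rw [hins, ih (l ++ [x])]
    simp

-- the rank function, case by case
theorem pv_rank_cases (kv : String × List (String × String)) :
    pvRank kv = if kv.1 == "text" then 0 else if kv.1 == "table" then 1
      else if kv.1 == "image" then 2 else 3 := by
  by_cases h1 : kv.1 = "text"
  · simp only [pvRank, h1]; decide
  · by_cases h2 : kv.1 = "table"
    · simp only [pvRank, h2]; decide
    · by_cases h3 : kv.1 = "image"
      · simp only [pvRank, h3]; decide
      · have hnone : PySem.List.index? ["text", "table", "image"] kv.1 = none := by
          rw [PySem.List.index?_eq_none_iff]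
          simp [h1, h2, h3, eq_comm]
        simp only [pvRank, hnone]
        simp [h1, h2, h3]

theorem pv_rank_le (kv : String × List (String × String)) : pvRank kv ≤ 3 := by
  rw [pv_rank_cases]; split_ifs <;> omega

-- the four rank filters are the three key filters plus the rest filter
theorem pv_f0 (L : List (String × List (String × String))) :
    L.filter (fun kv => pvRank kv == 0) = L.filter (fun kv => kv.1 == "text") := by
  apply List.filter_congr; intro kv _; rw [pv_rank_cases kv]; split_ifs <;> simp_all

theorem pv_f1 (L : List (String × List (String × String))) :
    L.filter (fun kv => pvRank kv == 1) = L.filter (fun kv => kv.1 == "table") := by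
  apply List.filter_congr; intro kv _; rw [pv_rank_cases kv]; split_ifs <;> simp_all

theorem pv_f2 (L : List (String × List (String × String))) :
    L.filter (fun kv => pvRank kv == 2) = L.filter (fun kv => kv.1 == "image") := by
  apply List.filter_congr; intro kv _; rw [pv_rank_cases kv]; split_ifs <;> simp_all

theorem pv_f3 (L : List (String × List (String × String))) :
    L.filter (fun kv => pvRank kv == 3)
      = L.filter (fun kv => !(kv.1 == "text") && !(kv.1 == "table") && !(kv.1 == "image")) := by
  apply List.filter_congr; intro kv _; rw [pv_rank_cases kv]; split_ifs <;> simp_all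

-- A's append-if fold is a filter.
theorem pv_foldl_filter {α : Type} (p : α → Bool) (L : List α) (acc : List α) :
    L.foldl (fun acc x => if p x then acc ++ [x] else acc) acc = acc ++ L.filter p := by
  induction L generalizing acc with
  | nil => simp
  | cons x t ih =>
    rw [List.foldl_cons]
    by_cases h : p x = true
    · rw [if_pos h, ih]
      simp [List.filter_cons, h, List.append_assoc]
    · rw [if_neg h, ih]
      simp [List.filter_cons, h]

-- filtering a nodup-keyed item list for a single key
theorem pv_filter_fst_nil {β : Type} (L : List (String × β)) (t : String)
    (h : t ∉ L.map Prod.fst) : L.filter (fun kv => kv.1 == t) = [] := by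
  rw [List.filter_eq_nil_iff]
  intro kv hm
  simp only [beq_iff_eq]
  intro he
  exact h (he ▸ List.mem_map_of_mem hm)

theorem pv_filter_fst_single {β : Type} (L : List (String × β)) (t : String) (v : β)
    (h : (L.map Prod.fst).Nodup) (hm : (t, v) ∈ L) :
    L.filter (fun kv => kv.1 == t) = [(t, v)] := by
  induction L with
  | nil => cases hm
  | cons x rest ih =>
    simp only [List.map_cons, List.nodup_cons] at h
    rcases List.mem_cons.mp hm with h0 | h0
    · subst h0
      simp only [List.filter_cons, beq_self_eq_true, if_pos, List.cons.injEq, true_and]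
      exact pv_filter_fst_nil rest t h.1
    · have hne : ¬ (x.1 = t) := by
        intro he
        exact h.1 (he ▸ List.mem_map_of_mem h0)
      simp only [List.filter_cons]
      rw [if_neg (by simpa using hne)]
      exact ih h.2 h0

theorem pv_filter_key (d : PySem.Dict String (List (String × String))) (hnd : d.keys.Nodup) (t : String) :
    d.items.filter (fun kv => kv.1 == t)
      = if d.contains t then [(t, d.getD t [])] else [] := by
  by_cases hc : d.contains t = true
  · rw [if_pos hc]
    rw [PySem.Dict.contains_eq_isSome_get?] at hc
    rcases Option.isSome_iff_exists.mp hc with ⟨v, hv⟩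
    have hm := PySem.Dict.mem_items_of_get?_eq_some d hv
    have : d.getD t [] = v := by rw [PySem.Dict.getD_eq_get?_getD, hv]; rfl
    rw [this]
    exact pv_filter_fst_single d.items t v hnd hm
  · rw [if_neg hc]
    apply pv_filter_fst_nil
    intro hmem
    exact hc ((PySem.Dict.contains_iff_mem_keys d t).mpr hmem)

theorem pv_pred (s : String) :
    (!((["text", "table", "image"] : List String).contains s))
      = (!(s == "text") && !(s == "table") && !(s == "image")) := by
  by_cases h1 : s = "text"
  · simp [h1]
  · by_cases h2 : s = "table"
    · simp [h2]
    · by_cases h3 : s = "image"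
      · simp [h3]
      · simp [h1, h2, h3]

theorem pv_ordered (d : PySem.Dict String (List (String × String))) :
    (["text", "table", "image"] : List String).foldl
      (fun acc t => if d.contains t then acc ++ [(t, d.getD t [])] else acc)
      ([] : List (String × List (String × String)))
    = (if d.contains "text" then [("text", d.getD "text" [])] else [])
      ++ (if d.contains "table" then [("table", d.getD "table" [])] else [])
      ++ (if d.contains "image" then [("image", d.getD "image" [])] else []) := by
  simp only [List.foldl_cons, List.foldl_nil]
  split_ifs <;> simp

-- Chars.join with empty separator is flatten
theorem pv_join_nil_flatten (ls : List (List Char)) : PySem.Chars.join [] ls = ls.flatten := by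
  induction ls with
  | nil => simp [PySem.Chars.join_nil]
  | cons a t ih =>
    cases t with
    | nil => simp [PySem.Chars.join_singleton]
    | cons b r =>
      rw [PySem.Chars.join_cons_cons]
      simp [ih]

-- A's += loop vs header ++ join(blocks) ++ footer, proved at the character-list level
theorem pv_foldl_toList (f g : String × List (String × String) → String)
    (L : List (String × List (String × String))) (r : String) :
    (L.foldl (fun r kv => (r ++ f kv) ++ g kv) r).toList
      = r.toList ++ (L.map (fun kv => (f kv).toList ++ (g kv).toList)).flatten := by
  induction L generalizing r with
  | nil => simp
  | cons x t ih => simp [ih, List.append_assoc]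

theorem pv_assemble (L : List (String × List (String × String))) (hdr ftr : String)
    (f g : String × List (String × String) → String) :
    (L.foldl (fun r kv => (r ++ f kv) ++ g kv) hdr) ++ ftr
      = PySem.Str.join "" ([hdr] ++ L.map (fun kv => f kv ++ g kv) ++ [ftr]) := by
  refine String.toList_inj.mp ?_
  simp [pv_foldl_toList, PySem.Str.toList_join, pv_join_nil_flatten, List.map_map,
    Function.comp_def, List.append_assoc]

-- ===== VERDICT (by name: the statement is the Claim_ definition above) =====
theorem create_multi_agent_response_py_spec : Claim_equal_create_multi_agent_response_py := by
  intro query results analysis _ _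
  unfold Spec_create_multi_agent_response_py
  simp only [create_multi_agent_response_py, create_multi_agent_response_py_alt]
  rw [pv_sorted_buckets pvRank pv_rank_le]
  rw [pv_f0, pv_f1, pv_f2, pv_f3]
  rw [pv_ordered, pv_foldl_filter]
  rw [pv_filter_key _ (PySem.Dict.nodup_keys_ofList results) "text",
    pv_filter_key _ (PySem.Dict.nodup_keys_ofList results) "table",
    pv_filter_key _ (PySem.Dict.nodup_keys_ofList results) "image"]
  simp only [pv_pred, List.append_assoc]
  rw [pv_assemble _ _ _
    (fun kv => "## " ++ pyTitle (PySem.Str.replace kv.1 "_" " ") ++ " Information:\n")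
    (fun kv => (PySem.Dict.ofList kv.2).getD "answer" "" ++ "\n\n")]
  simp [String.append_assoc]
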